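-- pv_equiv track=rewrite | github.com/Doarakko/kagoole | backend/scripts/batch.py | judge_data_types
-- ===== SOURCE A (Python) =====
-- def judge_data_types(tags, evaluation_metric):
--     data_types = []
--     for tag in tags:
--         if tag.lower().find('data') != -1:
--             data_types.append(tag.split()[0])
--         elif tag == 'time series':
--             data_types.append(tag)
--
--     # judge based on evaluation_metric
--     if 'image' not in data_types and evaluation_metric is not None and evaluation_metric.lower().find('image') != -1:
--         data_types.append('image')
--
--     # delete depulicate tag
--     for data_type in data_types:
--         if data_type == 'time series' and 'time series' in tags:
--             tags.remove(data_type)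
--         elif data_type + ' data' in tags:
--             tags.remove(data_type + ' data')
--
--     return data_types, tags
-- ===== SOURCE B (Python) =====
-- def judge_data_types(tags, evaluation_metric):
--     def classify(tag):
--         if 'data' in tag.lower():
--             return tag.split()[0]
--         if tag == 'time series':
--             return tag
--         return None
--     data_types = [d for d in map(classify, tags) if d is not None]
--
--     # judge based on evaluation_metric
--     if evaluation_metric is not None and 'image' in evaluation_metric.lower() \
--             and 'image' not in data_types:
--         data_types.append('image')
--
--     # delete duplicate tags: per-target removal budgets, then one filter pass
--     budget = {}
--     for d in data_types:
--         t = d if d == 'time series' else d + ' data'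
--         budget[t] = budget.get(t, 0) + 1
--     kept = []
--     for t in tags:
--         if budget.get(t, 0) > 0:
--             budget[t] -= 1
--         else:
--             kept.append(t)
--     tags[:] = kept
--     return data_types, tags
-- ===== Notes on version B (the rewrite author's own statement) =====
-- stated objective: alternative
-- what changed: The first pass becomes a classify-then-filter (filterMap) over tags instead of an accumulator loop, and the O(n^2) dedup loop (repeated 'in tags' scans plus tags.remove per data_type) is replaced by a dict of per-target removal budgets built once plus a single budget-consuming filter pass written back with tags[:] = kept.
import Mathlib
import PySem

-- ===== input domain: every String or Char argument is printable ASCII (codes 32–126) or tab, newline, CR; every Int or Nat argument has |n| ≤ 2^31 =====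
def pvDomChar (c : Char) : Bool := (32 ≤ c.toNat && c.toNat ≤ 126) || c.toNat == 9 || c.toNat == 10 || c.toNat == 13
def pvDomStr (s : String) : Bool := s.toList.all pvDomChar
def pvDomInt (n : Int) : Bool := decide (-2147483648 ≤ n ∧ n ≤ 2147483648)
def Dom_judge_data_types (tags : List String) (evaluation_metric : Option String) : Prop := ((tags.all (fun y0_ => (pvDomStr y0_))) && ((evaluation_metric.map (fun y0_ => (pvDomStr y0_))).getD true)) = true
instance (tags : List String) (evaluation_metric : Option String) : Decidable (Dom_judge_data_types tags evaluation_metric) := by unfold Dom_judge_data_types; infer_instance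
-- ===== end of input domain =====

-- B classifies each tag with a filterMap (classify-then-filter) instead of A's accumulator loop, and
-- replaces A's dedup loop (membership scans + tags.remove per data_type) by a budget dictionary built
-- once and a single filter pass. Both Pythons mutate `tags` in place; the mutated list equals the
-- returned second component in both, so the return-value equivalence covers the side effect as well.


-- ===== PORT A =====
def judge_data_types (tags : List String) (evaluation_metric : Option String) : List String × List String :=
  -- first loop: collect data_types
  let dts0 : List String := tags.foldl (fun acc tag =>
    if PySem.Str.find (PySem.Str.lower tag) "data" ≠ -1 then
      -- tag.split()[0]: the IndexError is unreachable (a tag containing "data" splits into ≥ 1 word)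
      acc ++ [(PySem.Str.split₀ tag).headD ""]
    else if tag = "time series" then acc ++ [tag]
    else acc) []
  -- judge based on evaluation_metric ('and' short-circuit rendered as nested branches)
  let dts : List String :=
    if "image" ∈ dts0 then dts0
    else match evaluation_metric with
      | none => dts0
      | some m => if PySem.Str.find (PySem.Str.lower m) "image" ≠ -1 then dts0 ++ ["image"] else dts0
  -- delete duplicate tag (tags.remove is guarded by the membership tests, so it never raises)
  let tags2 : List String := dts.foldl (fun ts d =>
    if d = "time series" ∧ "time series" ∈ ts then (PySem.List.remove? ts "time series").getD ts
    else if (d ++ " data") ∈ ts then (PySem.List.remove? ts (d ++ " data")).getD ts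
    else ts) tags
  (dts, tags2)

-- ===== PORT B =====
-- classify(tag) of Source B
def pvClassify (tag : String) : Option String :=
  if PySem.Str.isIn "data" (PySem.Str.lower tag) then some ((PySem.Str.split₀ tag).headD "")
  else if tag = "time series" then some tag
  else none

-- the budget-building loop of Source B, as structural recursion over data_types
def pvBudget : List String → PySem.Dict String Int → PySem.Dict String Int
  | [], b => b
  | d :: ds, b =>
    let t := if d = "time series" then d else d ++ " data"
    pvBudget ds (b.insert t (b.getD t 0 + 1))

-- the budget-consuming filter pass of Source B, as structural recursion over tags
def pvKeep : List String → PySem.Dict String Int → List String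
  | [], _ => []
  | t :: ts, b =>
    if 0 < b.getD t 0 then pvKeep ts (b.insert t (b.getD t 0 - 1))
    else t :: pvKeep ts b

def judge_data_types_alt (tags : List String) (evaluation_metric : Option String) : List String × List String :=
  let data_types : List String := tags.filterMap pvClassify
  -- judge based on evaluation_metric ('and' short-circuit rendered as nested branches)
  let dts : List String :=
    match evaluation_metric with
    | none => data_types
    | some m =>
      if PySem.Str.isIn "image" (PySem.Str.lower m) ∧ "image" ∉ data_types
      then data_types ++ ["image"] else data_types
  (dts, pvKeep tags (pvBudget dts PySem.Dict.empty))

-- ===== PRECONDITION & SPEC =====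
def Spec_judge_data_types (tags : List String) (evaluation_metric : Option String) (out : List String × List String) : Prop := out = judge_data_types_alt tags evaluation_metric
instance (tags : List String) (evaluation_metric : Option String) (out : List String × List String) : Decidable (Spec_judge_data_types tags evaluation_metric out) := by unfold Spec_judge_data_types; infer_instance

-- ===== CLAIM (what is proved, stated in full; the proofs are below) =====
def Claim_equal_judge_data_types : Prop := ∀ (tags : List String) (evaluation_metric : Option String), Dom_judge_data_types tags evaluation_metric → Spec_judge_data_types tags evaluation_metric (judge_data_types tags evaluation_metric)

-- ===== LEMMAS AND PROOFS =====

theorem pv_isIn_iff_find (sub s : String) :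
    PySem.Str.isIn sub s = true ↔ PySem.Str.find s sub ≠ -1 := by
  simp [PySem.Chars.isIn_iff_infix, PySem.Chars.find_ne_neg_one_iff]

-- A's first loop is B's filterMap
theorem pvA_first_loop : ∀ (tags acc : List String),
    tags.foldl (fun acc tag =>
      if PySem.Str.find (PySem.Str.lower tag) "data" ≠ -1 then
        acc ++ [(PySem.Str.split₀ tag).headD ""]
      else if tag = "time series" then acc ++ [tag]
      else acc) acc
    = acc ++ tags.filterMap pvClassify := by
  intro tags
  induction tags with
  | nil => intro acc; simp
  | cons tag tags ih =>
    intro acc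
    simp only [List.foldl_cons, List.filterMap_cons]
    by_cases h1 : PySem.Str.find (PySem.Str.lower tag) "data" ≠ -1
    · have hc : pvClassify tag = some ((PySem.Str.split₀ tag).headD "") := by
        unfold pvClassify; rw [if_pos ((pv_isIn_iff_find _ _).mpr h1)]
      rw [if_pos h1, hc, ih]; simp
    · have hIn : ¬ PySem.Str.isIn "data" (PySem.Str.lower tag) = true := by
        intro h; exact h1 ((pv_isIn_iff_find _ _).mp h)
      by_cases h2 : tag = "time series"
      · have hc : pvClassify tag = some tag := by
          unfold pvClassify; rw [if_neg hIn, if_pos h2]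
        rw [if_neg h1, if_pos h2, hc, ih]; simp
      · have hc : pvClassify tag = none := by
          unfold pvClassify; rw [if_neg hIn, if_neg h2]
        rw [if_neg h1, if_neg h2, hc, ih]

def pvTgt (d : String) : String := if d = "time series" then d else d ++ " data"

def pvBFilter (f : String → Int) : List String → List String
  | [] => []
  | t :: ts => if 0 < f t then pvBFilter (fun x => if x = t then f x - 1 else f x) ts
               else t :: pvBFilter f ts

theorem pvBFilter_cons (f : String → Int) (t : String) (ts : List String) :
    pvBFilter f (t :: ts) = if 0 < f t then pvBFilter (fun x => if x = t then f x - 1 else f x) ts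
               else t :: pvBFilter f ts := rfl

theorem pvTgt_ne_ts {d : String} (h : d ≠ "time series") : pvTgt d ≠ "time series" := by
  unfold pvTgt
  rw [if_neg h]
  intro hc
  have h' : d.toList ++ (" data").toList = ("time s").toList ++ ("eries").toList := by
    rw [← String.toList_append, hc]; decide
  have hlen : (" data").toList.length = ("eries").toList.length := by decide
  have := (List.append_inj' h' hlen).2
  simp at this

theorem pvBFilter_nonpos : ∀ (ts : List String) (f : String → Int), (∀ x, f x ≤ 0) → pvBFilter f ts = ts := by
  intro ts
  induction ts with
  | nil => intro f h; rfl
  | cons t ts ih =>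
    intro f h
    rw [pvBFilter_cons, if_neg (by have := h t; omega), ih f h]

theorem pvBFilter_inc : ∀ (ts : List String) (f : String → Int) (a : String), (∀ x, 0 ≤ f x) →
    pvBFilter (fun x => if x = a then f x + 1 else f x) ts = pvBFilter f (ts.erase a) := by
  intro ts
  induction ts with
  | nil => intro f a _; rfl
  | cons t ts ih =>
    intro f a hnn
    by_cases hta : t = a
    · subst hta
      rw [List.erase_cons_head, pvBFilter_cons, if_pos (by have := hnn t; simp; omega)]
      have : (fun x => if x = t then (if x = t then f x + 1 else f x) - 1 else (if x = t then f x + 1 else f x)) = f := by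
        funext x; by_cases h : x = t <;> simp [h]
      rw [this]
    · rw [List.erase_cons_tail (by simp [hta]), pvBFilter_cons, pvBFilter_cons]
      have hft : (if t = a then f t + 1 else f t) = f t := by rw [if_neg hta]
      rw [hft]
      by_cases h0 : 0 < f t
      · rw [if_pos h0, if_pos h0]
        have heq : (fun x => if x = t then (if x = a then f x + 1 else f x) - 1 else (if x = a then f x + 1 else f x))
             = (fun x => if x = a then (if x = t then f x - 1 else f x) + 1 else (if x = t then f x - 1 else f x)) := by
          funext x
          by_cases hx : x = t
          · subst hx; simp [hta]
          · by_cases hy : x = a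
            · subst hy; simp [hx]
            · simp [hx, hy]
        rw [heq, ih (fun x => if x = t then f x - 1 else f x) a ?_]
        intro x
        by_cases hx : x = t
        · subst hx; simp; omega
        · simp [hx]; exact hnn x
      · rw [if_neg h0, if_neg h0, ih f a hnn]

theorem pv_erase_fold : ∀ (L ts : List String),
    L.foldl (fun ts t => ts.erase t) ts = pvBFilter (fun t => (L.count t : Int)) ts := by
  intro L
  induction L with
  | nil =>
    intro ts
    simp only [List.foldl_nil]
    rw [pvBFilter_nonpos ts _ (by intro x; simp)]
  | cons a L ih =>
    intro ts
    simp only [List.foldl_cons]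
    rw [ih (ts.erase a)]
    rw [← pvBFilter_inc ts (fun t => (L.count t : Int)) a (by intro x; positivity)]
    congr 1
    funext x
    by_cases h : x = a
    · simp [h]
    · simp [h, Ne.symm h]

-- A's dedup loop is plain first-occurrence erasure of each target, given enough "time series" in ts
theorem pvAloop_eq_erase : ∀ (ds ts : List String),
    List.count "time series" ds ≤ List.count "time series" ts →
    ds.foldl (fun ts d =>
      if d = "time series" ∧ "time series" ∈ ts then (PySem.List.remove? ts "time series").getD ts
      else if (d ++ " data") ∈ ts then (PySem.List.remove? ts (d ++ " data")).getD ts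
      else ts) ts
    = (ds.map pvTgt).foldl (fun ts t => ts.erase t) ts := by
  intro ds
  induction ds with
  | nil => intro ts _; rfl
  | cons d ds ih =>
    intro ts hcnt
    simp only [List.foldl_cons, List.map_cons]
    by_cases hd : d = "time series"
    · subst hd
      have hmem : "time series" ∈ ts := by
        rw [← List.count_pos_iff]
        have : (0:Nat) < List.count "time series" ("time series" :: ds) := by simp
        omega
      rw [if_pos ⟨rfl, hmem⟩, PySem.List.remove?_eq_some_erase ts _ hmem, Option.getD_some]
      have htgt : pvTgt "time series" = "time series" := by unfold pvTgt; simp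
      rw [htgt]
      apply ih
      rw [List.count_erase_self]
      have : List.count "time series" ("time series" :: ds) = List.count "time series" ds + 1 := by
        simp
      omega
    · rw [if_neg (by intro h; exact hd h.1)]
      have htgt : pvTgt d = d ++ " data" := by unfold pvTgt; rw [if_neg hd]
      rw [htgt]
      have hcnt' : List.count "time series" ds ≤ List.count "time series" (ts.erase (d ++ " data")) := by
        have hne : (d ++ " data") ≠ "time series" := htgt ▸ pvTgt_ne_ts hd
        rw [List.count_erase_of_ne (Ne.symm hne)]
        have : List.count "time series" (d :: ds) = List.count "time series" ds := by
          simp [List.count_cons]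
          exact hd
        omega
      by_cases hmem : (d ++ " data") ∈ ts
      · rw [if_pos hmem, PySem.List.remove?_eq_some_erase ts _ hmem, Option.getD_some]
        exact ih _ hcnt'
      · have he : ts.erase (d ++ " data") = ts := List.erase_of_not_mem hmem
        rw [if_neg hmem, he]
        rw [he] at hcnt'
        exact ih _ hcnt'

-- B's recursive filter pass is pvBFilter over the budget's getD
theorem pvKeep_eq_bfilter : ∀ (ts : List String) (b : PySem.Dict String Int),
    pvKeep ts b = pvBFilter (fun t => b.getD t 0) ts := by
  intro ts
  induction ts with
  | nil => intro b; rfl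
  | cons t ts ih =>
    intro b
    rw [pvKeep, pvBFilter_cons]
    by_cases h0 : 0 < b.getD t 0
    · rw [if_pos h0, if_pos h0, ih]
      congr 1
      funext x
      rw [PySem.Dict.getD_insert]
      by_cases hx : x = t <;> simp [hx]
    · rw [if_neg h0, if_neg h0, ih]

-- B's recursive budget build is the foldl of insert-increments
theorem pvBudget_eq_foldl : ∀ (ds : List String) (b : PySem.Dict String Int),
    pvBudget ds b = ds.foldl (fun b d => b.insert (pvTgt d) (b.getD (pvTgt d) 0 + 1)) b := by
  intro ds
  induction ds with
  | nil => intro b; rfl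
  | cons d ds ih =>
    intro b
    rw [pvBudget, List.foldl_cons, ih]
    rfl

theorem pv_go_no_space : ∀ (s cur : List Char) (acc : List (List Char)),
    (∀ c ∈ cur, PySem.Chars.isspace c = false) →
    (∀ w ∈ acc, ∀ c ∈ w, PySem.Chars.isspace c = false) →
    ∀ w ∈ PySem.Chars.split₀.go s cur acc, ∀ c ∈ w, PySem.Chars.isspace c = false := by
  intro s
  induction s with
  | nil =>
    intro cur acc hcur hacc w hw
    simp only [PySem.Chars.split₀.go] at hw
    split at hw
    · simp at hw; exact hacc _ (by simpa using hw)
    · simp at hw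
      rcases hw with hw | hw
      · exact hacc _ hw
      · subst hw; intro c hc; exact hcur c (by simpa using hc)
  | cons c rest ih =>
    intro cur acc hcur hacc w hw
    simp only [PySem.Chars.split₀.go] at hw
    split at hw
    · split at hw
      · exact ih [] acc (by simp) hacc w hw
      · refine ih [] _ (by simp) ?_ w hw
        intro w' hw'
        simp at hw'
        rcases hw' with hw' | hw'
        · subst hw'; intro c' hc'; exact hcur c' (by simpa using hc')
        · exact hacc _ hw'
    · rename_i hsp
      refine ih (c :: cur) acc ?_ hacc w hw
      intro c' hc'
      rcases List.mem_cons.mp hc' with h | h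
      · subst h; simpa using hsp
      · exact hcur c' h

theorem pv_head_split₀_ne (tag : String) : (PySem.Str.split₀ tag).headD "" ≠ "time series" := by
  cases h : PySem.Str.split₀ tag with
  | nil => simp
  | cons w ws =>
    simp only [List.headD_cons]
    intro hw
    have hmem : w.toList ∈ PySem.Chars.split₀ tag.toList := by
      rw [← PySem.Str.split₀_map_toList, h]
      simp
    have := pv_go_no_space tag.toList [] [] (by simp) (by simp) w.toList hmem ' ' (by rw [hw]; decide)
    simp at this
    exact absurd this (by decide)

-- count of "time series" in the classified list is bounded by its count in tags
theorem pv_count_classify : ∀ (tags : List String),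
    List.count "time series" (tags.filterMap pvClassify) ≤ List.count "time series" tags := by
  intro tags
  induction tags with
  | nil => simp
  | cons tag tags ih =>
    simp only [List.filterMap_cons]
    by_cases h1 : PySem.Str.isIn "data" (PySem.Str.lower tag) = true
    · have hc : pvClassify tag = some ((PySem.Str.split₀ tag).headD "") := by
        unfold pvClassify; rw [if_pos h1]
      rw [hc]
      simp only [List.count_cons]
      have hne : ((PySem.Str.split₀ tag).headD "" == "time series") = false := by
        simpa using pv_head_split₀_ne tag
      rw [hne]
      simp only [Bool.false_eq_true, if_false]
      split <;> omega
    · by_cases h2 : tag = "time series"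
      · have hc : pvClassify tag = some tag := by
          unfold pvClassify; rw [if_neg h1, if_pos h2]
        rw [hc]
        subst h2
        simp only [List.count_cons, beq_self_eq_true, if_true]
        omega
      · have hc : pvClassify tag = none := by
          unfold pvClassify; rw [if_neg h1, if_neg h2]
        rw [hc]
        simp only [List.count_cons]
        split <;> omega

-- the whole dedup phase: A's removal loop equals B's budget build + filter pass
theorem pv_dedup_eq (dts tags : List String)
    (hcnt : List.count "time series" dts ≤ List.count "time series" tags) :
    dts.foldl (fun ts d =>
      if d = "time series" ∧ "time series" ∈ ts then (PySem.List.remove? ts "time series").getD ts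
      else if (d ++ " data") ∈ ts then (PySem.List.remove? ts (d ++ " data")).getD ts
      else ts) tags
    = pvKeep tags (pvBudget dts PySem.Dict.empty) := by
  rw [pvAloop_eq_erase dts tags hcnt, pv_erase_fold, pvKeep_eq_bfilter, pvBudget_eq_foldl]
  congr 1
  funext v
  rw [← List.foldl_map (f := pvTgt)
      (g := fun (b : PySem.Dict String Int) (t : String) => b.insert t (b.getD t 0 + 1)),
    PySem.Dict.getD_foldl_insert_add_one]
  simp

-- ===== VERDICT (by name: the statement is the Claim_ definition above) =====
theorem judge_data_types_spec : Claim_equal_judge_data_types := by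
  intro tags em _
  unfold Spec_judge_data_types
  unfold judge_data_types judge_data_types_alt
  dsimp only
  rw [pvA_first_loop tags []]
  simp only [List.nil_append]
  set dts0 : List String := tags.filterMap pvClassify with hdts0
  have h0 : List.count "time series" dts0 ≤ List.count "time series" tags := pv_count_classify tags
  have h1 : List.count "time series" (dts0 ++ ["image"]) ≤ List.count "time series" tags := by
    rw [List.count_append]
    have : List.count "time series" ["image"] = 0 := by decide
    omega
  by_cases himg : "image" ∈ dts0
  · simp only [if_pos himg]
    cases em with
    | none => exact Prod.ext rfl (pv_dedup_eq dts0 tags h0)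
    | some m =>
      dsimp only
      rw [if_neg (by intro h; exact h.2 himg)]
      exact Prod.ext rfl (pv_dedup_eq dts0 tags h0)
  · simp only [if_neg himg]
    cases em with
    | none =>
      dsimp only
      exact Prod.ext rfl (pv_dedup_eq dts0 tags h0)
    | some m =>
      dsimp only
      by_cases hf : PySem.Str.find (PySem.Str.lower m) "image" ≠ -1
      · rw [if_pos hf, if_pos ⟨(pv_isIn_iff_find _ _).mpr hf, himg⟩]
        exact Prod.ext rfl (pv_dedup_eq (dts0 ++ ["image"]) tags h1)
      · rw [if_neg hf, if_neg (by intro h; exact hf ((pv_isIn_iff_find _ _).mp h.1))]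
        exact Prod.ext rfl (pv_dedup_eq dts0 tags h0)
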